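-- pv_equiv track=rewrite | github.com/ngarde2882/Portfolio | Disc-Stuff/Project P/ivy-scraper.py | ability_string_to_list
-- ===== SOURCE A (Python) =====
-- def lower_to_upper_abilities(s):
--     for c in range(1, len(s)):
--         if s[c] == s[c].upper():
--             if s[c]==' ': continue
--             if s[c-1] == s[c-1].lower():
--                 if s[c-1]==' ': continue
--                 return c
--     return None
--
-- def ability_string_to_list(s):
--     # test cases: ['Pickup or Technician (Meowth', 'Pickup or Technician (Alolan Meowth', 'Pickup or Tough Claws (Galarian Meowth']
--     index = lower_to_upper_abilities(s)
--     if index: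
--         s = s[:index]
--     out = []
--     temp = ''
--     for c in s:
--         temp+=c
--         if ' or ' in temp: # first ability done
--             out.append(temp[:-4])
--             temp = ''
--         if c == '(': # second ability done
--             out.append(temp[:-2111])
--             temp = ''
--             break # no more abilities in string
--     if temp: # case of single ability or no forms, temp has ability left in it
--         out.append(temp)
--     return out
-- ===== SOURCE B (Python) =====
-- def ability_string_to_list(s):
--     # Single O(n) pass over indices with a segment-start marker and a 4-char
--     # window check, instead of A's growing buffer rescanned for ' or ' at every
--     # character. Behaviour preserved exactly, including the [:-2111] trim A
--     # applies to the segment ending at '('.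
--     cut = 0
--     for i in range(1, len(s)):
--         a, b = s[i - 1], s[i]
--         if b != ' ' and b == b.upper() and a != ' ' and a == a.lower():
--             cut = i
--             break
--     if cut:
--         s = s[:cut]
--     out = []
--     start = 0
--     for i in range(len(s)):
--         c = s[i]
--         if c == '(':
--             out.append(s[start:i + 1][:-2111])
--             return out
--         if c == ' ' and i - start >= 3 and s[i - 3:i + 1] == ' or ':
--             out.append(s[start:i - 3])
--             start = i + 1
--     if start < len(s):
--         out.append(s[start:])
--     return out
-- ===== Notes on version B (the rewrite author's own statement) =====
-- stated objective: faster
-- what changed: B replaces A's growing buffer with repeated ' or ' substring rescans by one index-based pass that checks only the current 4-char window and slices segments out of s directly, preserving A's behaviour exactly (including the [:-2111] trim at '(').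
import Mathlib
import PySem

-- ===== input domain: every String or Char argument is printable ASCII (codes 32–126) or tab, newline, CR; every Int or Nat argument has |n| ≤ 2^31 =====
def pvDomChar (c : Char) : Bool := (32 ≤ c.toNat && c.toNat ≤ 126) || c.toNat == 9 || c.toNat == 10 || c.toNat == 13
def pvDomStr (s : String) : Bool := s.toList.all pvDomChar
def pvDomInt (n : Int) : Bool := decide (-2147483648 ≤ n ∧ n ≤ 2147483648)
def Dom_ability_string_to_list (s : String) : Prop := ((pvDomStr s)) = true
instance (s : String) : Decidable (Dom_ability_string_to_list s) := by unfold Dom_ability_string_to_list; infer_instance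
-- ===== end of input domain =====

-- B is a single O(n) pass over an index/segment-start pair (4-char window check) instead of
-- A's growing buffer rescanned for ' or ' at every step; same return value on every input.

-- ===== PORT A =====
-- port of lower_to_upper_abilities: for c in range(1, len(s)): …
def pvLtuGo (cs : List Char) : Nat → Nat → Option Int
  | 0, _ => none
  | fuel+1, c =>
    if h : c < cs.length then
      if cs[c] = PySem.Chars.upperChar cs[c] then
        if cs[c] = ' ' then pvLtuGo cs fuel (c+1)
        else if cs[c-1]'(by omega) = PySem.Chars.lowerChar (cs[c-1]'(by omega)) then
          if cs[c-1]'(by omega) = ' ' then pvLtuGo cs fuel (c+1)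
          else some (c : Int)
        else pvLtuGo cs fuel (c+1)
      else pvLtuGo cs fuel (c+1)
    else none

-- port of A's main loop: temp grows, ' or ' rescanned in temp, break at '('
def pvAGo (cs : List Char) (out : List String) (temp : List Char) : List String :=
  match cs with
  | [] => if temp.isEmpty then out else out ++ [String.ofList temp]
  | c :: rest =>
    let temp1 := temp ++ [c]
    let hit := PySem.Chars.isIn " or ".toList temp1
    let out1 := if hit then out ++ [String.ofList (PySem.List.slice temp1 none (some (-4)))] else out
    let temp2 := if hit then [] else temp1
    if c = '(' then out1 ++ [String.ofList (PySem.List.slice temp2 none (some (-2111)))]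
    else pvAGo rest out1 temp2

def ability_string_to_list (s : String) : List String :=
  let cs0 := s.toList
  let cs :=
    match pvLtuGo cs0 cs0.length 1 with
    | some i => if i ≠ 0 then PySem.List.slice cs0 none (some i) else cs0
    | none => cs0
  pvAGo cs [] []

-- ===== PORT B =====
-- Source B's cut loop: first i ≥ 1 with s[i] upper-stable non-space after a lower-stable non-space
def pvCutGo (cs : List Char) : Nat → Nat → Nat
  | 0, _ => 0
  | fuel+1, i =>
    if h : i < cs.length then
      let a := cs[i-1]'(by omega)
      let b := cs[i]
      if b ≠ ' ' ∧ b = PySem.Chars.upperChar b ∧ a ≠ ' ' ∧ a = PySem.Chars.lowerChar a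
      then i else pvCutGo cs fuel (i+1)
    else 0

-- loop exit of Source B's main pass (the code after the for loop)
def pvBExit (cs : List Char) (start : Nat) (out : List String) : List String :=
  if start < cs.length then out ++ [String.ofList (PySem.List.slice cs (some (start:Int)) none)] else out

-- Source B's single pass: segment start index, 4-char window check, direct slices of s
def pvBGo (cs : List Char) : Nat → Nat → Nat → List String → List String
  | 0, _, start, out => pvBExit cs start out
  | fuel+1, i, start, out =>
    if h : i < cs.length then
      let c := cs[i]
      if c = '(' then
        out ++ [String.ofList (PySem.List.slice (PySem.List.slice cs (some (start:Int)) (some ((i:Int)+1))) none (some (-2111)))]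
      else if c = ' ' ∧ 3 ≤ i - start ∧ PySem.List.slice cs (some ((i:Int)-3)) (some ((i:Int)+1)) = " or ".toList then
        pvBGo cs fuel (i+1) (i+1) (out ++ [String.ofList (PySem.List.slice cs (some (start:Int)) (some ((i:Int)-3)))])
      else pvBGo cs fuel (i+1) start out
    else pvBExit cs start out

def ability_string_to_list_alt (s : String) : List String :=
  let cs0 := s.toList
  let cut := pvCutGo cs0 cs0.length 1
  let cs := if cut ≠ 0 then PySem.List.slice cs0 none (some (cut:Int)) else cs0
  pvBGo cs cs.length 0 0 []

-- ===== PRECONDITION & SPEC =====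
def Spec_ability_string_to_list (s : String) (out : List String) : Prop := out = ability_string_to_list_alt s
instance (s : String) (out : List String) : Decidable (Spec_ability_string_to_list s out) := by unfold Spec_ability_string_to_list; infer_instance

-- ===== CLAIM (what is proved, stated in full; the proofs are below) =====
def Claim_equal_ability_string_to_list : Prop := ∀ (s : String), Dom_ability_string_to_list s → Spec_ability_string_to_list s (ability_string_to_list s)

-- ===== LEMMAS AND PROOFS =====

-- step-shape of A's helper loop as one four-way conjunction
lemma pv_ltu_step (cs : List Char) (m i : Nat) (h : i < cs.length) :
    pvLtuGo cs (m+1) i =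
      (if (cs[i] ≠ ' ' ∧ cs[i] = PySem.Chars.upperChar cs[i] ∧ cs[i-1]'(by omega) ≠ ' ' ∧ cs[i-1]'(by omega) = PySem.Chars.lowerChar (cs[i-1]'(by omega)))
       then some (i : Int) else pvLtuGo cs m (i+1)) := by
  by_cases hP : (cs[i] ≠ ' ' ∧ cs[i] = PySem.Chars.upperChar cs[i] ∧ cs[i-1]'(by omega) ≠ ' ' ∧ cs[i-1]'(by omega) = PySem.Chars.lowerChar (cs[i-1]'(by omega)))
  · obtain ⟨p1, p2, p3, p4⟩ := hP
    rw [if_pos ⟨p1, p2, p3, p4⟩]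
    simp only [pvLtuGo]
    rw [dif_pos h, if_pos p2, if_neg p1, if_pos p4, if_neg p3]
  · rw [if_neg hP]
    simp only [pvLtuGo]
    rw [dif_pos h]
    split_ifs with h1 h2 h3 h4
    · rfl
    · rfl
    · exact absurd ⟨h2, h1, h4, h3⟩ hP
    · rfl
    · rfl

-- step-shape of Source B's cut loop
lemma pv_cut_step (cs : List Char) (m i : Nat) (h : i < cs.length) :
    pvCutGo cs (m+1) i =
      (if (cs[i] ≠ ' ' ∧ cs[i] = PySem.Chars.upperChar cs[i] ∧ cs[i-1]'(by omega) ≠ ' ' ∧ cs[i-1]'(by omega) = PySem.Chars.lowerChar (cs[i-1]'(by omega)))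
       then i else pvCutGo cs m (i+1)) := by
  simp only [pvCutGo, dif_pos h]

-- A's helper equals Source B's cut loop (Option vs 0-sentinel)
lemma pv_ltu_eq_cut (cs : List Char) : ∀ n i, 1 ≤ i →
    pvLtuGo cs n i = (if pvCutGo cs n i = 0 then none else some ((pvCutGo cs n i : Nat) : Int)) := by
  intro n
  induction n with
  | zero => intro i hi; simp [pvLtuGo, pvCutGo]
  | succ m ih =>
    intro i hi
    by_cases h : i < cs.length
    · rw [pv_ltu_step cs m i h, pv_cut_step cs m i h]
      by_cases hP : (cs[i] ≠ ' ' ∧ cs[i] = PySem.Chars.upperChar cs[i] ∧ cs[i-1]'(by omega) ≠ ' ' ∧ cs[i-1]'(by omega) = PySem.Chars.lowerChar (cs[i-1]'(by omega)))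
      · rw [if_pos hP, if_pos hP, if_neg (by omega)]
      · rw [if_neg hP, if_neg hP]
        exact ih (i+1) (by omega)
    · simp [pvLtuGo, pvCutGo, dif_neg h]

-- the truncation step of port A equals the truncation step of port B
lemma pv_trunc_eq (cs : List Char) :
    (match pvLtuGo cs cs.length 1 with
     | some i => if i ≠ 0 then PySem.List.slice cs none (some i) else cs
     | none => cs)
    = (if pvCutGo cs cs.length 1 ≠ 0 then PySem.List.slice cs none (some ((pvCutGo cs cs.length 1 : Nat) : Int)) else cs) := by
  rw [pv_ltu_eq_cut cs cs.length 1 (by omega)]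
  by_cases h0 : pvCutGo cs cs.length 1 = 0
  · simp [h0]
  · rw [if_neg h0]
    have hm : (match some ((pvCutGo cs cs.length 1 : Nat) : Int) with
        | some i => if i ≠ 0 then PySem.List.slice cs none (some i) else cs
        | none => cs)
        = if ((pvCutGo cs cs.length 1 : Nat) : Int) ≠ 0 then PySem.List.slice cs none (some ((pvCutGo cs cs.length 1 : Nat) : Int)) else cs := rfl
    rw [hm, if_pos (by exact_mod_cast h0), if_pos h0]

-- an infix a list did not already contain must end at the appended element
lemma pv_infix_snoc {p t : List Char} {c : Char} (hp : ¬ p <:+: t) (h : p <:+: t ++ [c]) :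
    p <:+ t ++ [c] := by
  obtain ⟨u, v, huv⟩ := h
  rcases v.eq_nil_or_concat with rfl | ⟨v', d, rfl⟩
  · exact ⟨u, by simpa using huv⟩
  · exfalso; apply hp
    have h0 : (u ++ p ++ v') ++ [d] = t ++ [c] := by simpa using huv
    have h2 := List.append_inj' h0 rfl
    exact ⟨u, v', by simpa using h2.1⟩

-- appending the next character extends A's buffer by one
lemma pv_snoc (t : List Char) (start i : Nat) (hstart : start ≤ i) (hi : i < t.length) :
    (t.drop start).take (i - start) ++ [t[i]] = (t.drop start).take (i - start + 1) := by
  rw [List.take_add_one]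
  congr 1
  rw [List.getElem?_drop]
  have e : start + (i - start) = i := by omega
  rw [e, List.getElem?_eq_getElem hi]
  rfl

-- the last 4 characters of the buffer form the window t[i-3 .. i+1]
lemma pv_wincalc (t : List Char) (start i : Nat) (h3 : 3 ≤ i - start) :
    ((t.drop start).take (i - start + 1)).drop (i - start - 3) = (t.drop (i - 3)).take 4 := by
  rw [List.drop_take, List.drop_drop]
  have e1 : start + (i - start - 3) = i - 3 := by omega
  have e2 : i - start + 1 - (i - start - 3) = 4 := by omega
  rw [e1, e2]

-- the fresh-suffix test of A's buffer equals B's 4-char window condition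
lemma pv_window (t : List Char) (i start : Nat) (hstart : start ≤ i) (hi : i < t.length)
    (hprev : ¬ (" or ".toList <:+: (t.drop start).take (i - start))) :
    PySem.Chars.isIn " or ".toList ((t.drop start).take (i - start) ++ [t[i]]) = true
    ↔ (t[i] = ' ' ∧ 3 ≤ i - start ∧ PySem.List.slice t (some ((i:Int)-3)) (some ((i:Int)+1)) = " or ".toList) := by
  have hlen : ((t.drop start).take (i - start)).length = i - start := by
    simp [List.length_take, List.length_drop]; omega
  constructor
  · intro hin
    have hinf : " or ".toList <:+: ((t.drop start).take (i - start) ++ [t[i]]) :=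
      (PySem.Chars.isIn_iff_infix _ _).1 hin
    obtain ⟨u, hu⟩ := pv_infix_snoc hprev hinf
    have hul : u.length + 4 = (i - start) + 1 := by
      have := congrArg List.length hu
      simpa [hlen] using this
    have h3 : 3 ≤ i - start := by omega
    have h3i : 3 ≤ i := by omega
    have hdropeq : ((t.drop start).take (i - start) ++ [t[i]]).drop (i - start - 3) = " or ".toList := by
      rw [← hu, List.drop_append]
      have hu3 : u.length = i - start - 3 := by omega
      simp [hu3]
    have hwin : (t.drop (i - 3)).take 4 = " or ".toList := by
      rw [← pv_wincalc t start i h3, ← pv_snoc t start i hstart hi]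
      exact hdropeq
    refine ⟨?_, h3, ?_⟩
    · have hget := congrArg (fun l => l[3]?) hwin
      simp only [List.getElem?_take, List.getElem?_drop] at hget
      have e4 : i - 3 + 3 = i := by omega
      simp [e4, List.getElem?_eq_getElem hi] at hget
      simpa using hget
    · have ec1 : (i:Int) - 3 = ((i - 3 : Nat) : Int) := by omega
      have ec2 : (i:Int) + 1 = ((i + 1 : Nat) : Int) := by omega
      rw [ec1, ec2, PySem.List.slice_natCast]
      have e5 : i + 1 - (i - 3) = 4 := by omega
      rw [e5, hwin]
  · rintro ⟨hsp, h3, hslice⟩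
    have h3i : 3 ≤ i := by omega
    have ec1 : (i:Int) - 3 = ((i - 3 : Nat) : Int) := by omega
    have ec2 : (i:Int) + 1 = ((i + 1 : Nat) : Int) := by omega
    rw [ec1, ec2, PySem.List.slice_natCast] at hslice
    have e5 : i + 1 - (i - 3) = 4 := by omega
    rw [e5] at hslice
    have hsuf : " or ".toList <:+ ((t.drop start).take (i - start) ++ [t[i]]) := by
      rw [pv_snoc t start i hstart hi, ← hslice, ← pv_wincalc t start i h3]
      exact List.drop_suffix _ _
    exact (PySem.Chars.isIn_iff_infix _ _).2 hsuf.isInfix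

-- loop exit: both programs emit the remaining segment iff it is nonempty
lemma pv_end (t : List Char) (i start : Nat) (out : List String)
    (hstart : start ≤ i) (hil : t.length ≤ i) :
    pvAGo (t.drop i) out ((t.drop start).take (i - start)) = pvBExit t start out := by
  rw [List.drop_eq_nil_of_le (by omega : t.length ≤ i)]
  have htemp : (t.drop start).take (i - start) = t.drop start :=
    List.take_of_length_le (by simp [List.length_drop]; omega)
  unfold pvBExit
  rw [htemp, PySem.List.slice_from_natCast]
  by_cases hs : start < t.length
  · rw [if_pos hs]
    simp only [pvAGo]
    rw [if_neg (by simp [List.isEmpty_iff, List.drop_eq_nil_iff]; omega)]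
  · rw [if_neg hs]
    simp only [pvAGo]
    rw [if_pos (by simp [List.isEmpty_iff, List.drop_eq_nil_iff]; omega)]

lemma pv_ago_step (c : Char) (rest : List Char) (out : List String) (temp : List Char) :
    pvAGo (c :: rest) out temp =
      (if c = '(' then
        (if PySem.Chars.isIn " or ".toList (temp ++ [c]) then out ++ [String.ofList (PySem.List.slice (temp ++ [c]) none (some (-4)))] else out)
          ++ [String.ofList (PySem.List.slice (if PySem.Chars.isIn " or ".toList (temp ++ [c]) then ([] : List Char) else temp ++ [c]) none (some (-2111)))]
      else pvAGo rest
        (if PySem.Chars.isIn " or ".toList (temp ++ [c]) then out ++ [String.ofList (PySem.List.slice (temp ++ [c]) none (some (-4)))] else out)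
        (if PySem.Chars.isIn " or ".toList (temp ++ [c]) then [] else temp ++ [c])) := rfl

lemma pv_bgo_step (cs : List Char) (m i start : Nat) (out : List String) (h : i < cs.length) :
    pvBGo cs (m+1) i start out =
      (if cs[i] = '(' then
        out ++ [String.ofList (PySem.List.slice (PySem.List.slice cs (some (start:Int)) (some ((i:Int)+1))) none (some (-2111)))]
      else if (cs[i] = ' ' ∧ 3 ≤ i - start ∧ PySem.List.slice cs (some ((i:Int)-3)) (some ((i:Int)+1)) = " or ".toList) then
        pvBGo cs m (i+1) (i+1) (out ++ [String.ofList (PySem.List.slice cs (some (start:Int)) (some ((i:Int)-3)))])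
      else pvBGo cs m (i+1) start out) := by
  conv_lhs => rw [pvBGo]
  rw [dif_pos h]

-- main correspondence: A's buffer pass equals B's index pass
lemma pvMain (t : List Char) : ∀ n i start (out : List String),
    t.length ≤ n + i → start ≤ i → i ≤ t.length →
    ¬ (" or ".toList <:+: (t.drop start).take (i - start)) →
    pvAGo (t.drop i) out ((t.drop start).take (i - start)) = pvBGo t n i start out := by
  intro n
  induction n with
  | zero =>
    intro i start out hn hstart hil _
    have := pv_end t i start out hstart (by omega)
    simpa [pvBGo] using this
  | succ m ih =>
    intro i start out hn hstart hil hprev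
    by_cases hi : i < t.length
    · have hd : t.drop i = t[i] :: t.drop (i+1) := List.drop_eq_getElem_cons hi
      rw [hd, pv_ago_step, pv_bgo_step t m i start out hi]
      by_cases hpar : t[i] = '('
      · -- the '(' step: both append the same [:-2111]-trimmed segment
        rw [if_pos hpar, if_pos hpar]
        have hhit : PySem.Chars.isIn " or ".toList ((t.drop start).take (i - start) ++ [t[i]]) = false := by
          rw [Bool.eq_false_iff]
          intro hc
          have := ((pv_window t i start hstart hi hprev).1 hc).1
          rw [hpar] at this
          exact absurd this (by decide)
        rw [hhit]
        simp only [Bool.false_eq_true, if_false]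
        congr 3
        have ec : (i:Int) + 1 = ((i + 1 : Nat) : Int) := by omega
        rw [ec, PySem.List.slice_natCast]
        have e : i + 1 - start = i - start + 1 := by omega
        rw [e, ← pv_snoc t start i hstart hi]
      · -- not '(' : recurse, via the window iff
        rw [if_neg hpar, if_neg hpar]
        by_cases hhit : PySem.Chars.isIn " or ".toList ((t.drop start).take (i - start) ++ [t[i]]) = true
        · obtain ⟨hsp, h3, hslice⟩ := (pv_window t i start hstart hi hprev).1 hhit
          rw [hhit]
          simp only [if_true]
          rw [if_pos ⟨hsp, h3, hslice⟩]
          -- appended pieces agree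
          have hpiece : PySem.List.slice ((t.drop start).take (i - start) ++ [t[i]]) none (some (-4))
              = PySem.List.slice t (some (start:Int)) (some ((i:Int)-3)) := by
            have h3i : 3 ≤ i := by omega
            have ec1 : (i:Int) - 3 = ((i - 3 : Nat) : Int) := by omega
            rw [ec1, PySem.List.slice_natCast]
            rw [PySem.List.slice_to_neg_ofNat _ 4 (by norm_num)]
            have hl : ((t.drop start).take (i - start) ++ [t[i]]).length = (i - start) + 1 := by
              simp [List.length_take, List.length_drop]; omega
            rw [hl, pv_snoc t start i hstart hi, List.take_take]
            have e : min (i - start + 1 - 4) (i - start + 1) = i - 3 - start := by omega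
            rw [e]
          rw [hpiece]
          have hrest := ih (i+1) (i+1) (out ++ [String.ofList (PySem.List.slice t (some (start:Int)) (some ((i:Int)-3)))])
            (by omega) (by omega) (by omega) (by simp)
          simpa using hrest
        · have hhitf : PySem.Chars.isIn " or ".toList ((t.drop start).take (i - start) ++ [t[i]]) = false := by
            simpa using hhit
          rw [hhitf]
          simp only [Bool.false_eq_true, if_false]
          rw [if_neg (fun hc => hhit ((pv_window t i start hstart hi hprev).2 hc))]
          have hprev' : ¬ (" or ".toList <:+: (t.drop start).take ((i+1) - start)) := by
            have e : (i+1) - start = (i - start) + 1 := by omega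
            rw [e, ← pv_snoc t start i hstart hi]
            intro hc
            exact hhit ((PySem.Chars.isIn_iff_infix _ _).2 hc)
          have hrest := ih (i+1) start out (by omega) (by omega) (by omega) hprev'
          rw [pv_snoc t start i hstart hi]
          have e : (i+1) - start = (i - start) + 1 := by omega
          rw [← e]
          exact hrest
    · -- i = t.length : loop exit
      have := pv_end t i start out hstart (by omega)
      rw [this]
      conv_rhs => rw [pvBGo]
      rw [dif_neg hi]

-- ===== VERDICT (by name: the statement is the Claim_ definition above) =====
theorem ability_string_to_list_spec : Claim_equal_ability_string_to_list := by
  intro s _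
  show ability_string_to_list s = ability_string_to_list_alt s
  simp only [ability_string_to_list, ability_string_to_list_alt]
  rw [pv_trunc_eq]
  set t := (if pvCutGo s.toList s.toList.length 1 ≠ 0 then PySem.List.slice s.toList none (some ((pvCutGo s.toList s.toList.length 1 : Nat) : Int)) else s.toList) with ht
  have h := pvMain t t.length 0 0 [] (by omega) (by omega) (by omega) (by simp)
  simpa using h
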